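-- pv_equiv track=rewrite | github.com/Svenskithesource/PyArmor-Unpacker | methods/method 1/method_1.py | calculate_extended_args
-- ===== SOURCE A (Python) =====
-- def calculate_extended_args(arg: int):  # This function will calculate the necessary extended_args needed
--     """
--     EXTENDED_ARG logic:
--     - Its opcode shifts left by 8, and adds it to the next opcode
--     - There are a maximum of 3 EXTENDED_ARGs for one opcode because
--       the first of those will be shifted 3 times for a total of
--       24 bits shifted. This fits exactly in the 32-bit integer boundaries.
--     """
--     extended_args = []
--     new_arg = arg
--     if arg > 255:
--         extended_arg = arg >> 8
--         while True:
--             if extended_arg > 255: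
--                 extended_args.append(extended_arg & 255)
--                 extended_arg >>= 8
--             else:
--                 extended_args.append(extended_arg)
--                 extended_args.reverse() # reverse because we appended in the order
--                                         # of most recent EXTENDED_ARG (the one closest to
--                                         # the actual opcode) to the least recent EXTENDED_ARG
--                                         # (the one farthest from the actual opcode)
--                 break
--
--         new_arg = arg & 255
--     return extended_args, new_arg
-- ===== SOURCE B (Python) =====
-- def calculate_extended_args(arg: int):  # This function will calculate the necessary extended_args needed
--     # Serialize the argument with int.to_bytes instead of a shift/append/reverse loop:
--     # the leading big-endian bytes are the EXTENDED_ARG operands, the last byte is the new arg.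
--     if arg <= 255:
--         return [], arg
--     nbytes = (arg.bit_length() + 7) // 8
--     data = arg.to_bytes(nbytes, 'big')
--     return list(data[:-1]), data[-1]
-- ===== Notes on version B (the rewrite author's own statement) =====
-- stated objective: idiomatic
-- what changed: Replaces the manual shift/append/reverse accumulation loop with direct big-endian serialization: int.to_bytes of bit_length-derived width, returning the leading bytes and the last byte.
import Mathlib
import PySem

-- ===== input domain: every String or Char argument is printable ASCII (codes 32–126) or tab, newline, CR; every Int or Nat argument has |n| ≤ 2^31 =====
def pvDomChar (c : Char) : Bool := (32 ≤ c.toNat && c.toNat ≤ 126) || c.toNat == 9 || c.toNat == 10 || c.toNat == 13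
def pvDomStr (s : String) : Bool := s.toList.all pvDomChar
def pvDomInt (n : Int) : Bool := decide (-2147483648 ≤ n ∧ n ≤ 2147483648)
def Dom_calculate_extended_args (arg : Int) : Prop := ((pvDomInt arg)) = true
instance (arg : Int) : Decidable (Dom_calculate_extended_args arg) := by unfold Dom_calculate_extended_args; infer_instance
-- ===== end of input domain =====

-- B serializes the argument via int.to_bytes-style big-endian byte extraction instead of A's
-- shift/append/reverse loop (objective: more idiomatic, same cost).

-- ===== PORT A =====
-- termination measure for A's loop (cited by name in decreasing_by)
theorem pv_shift8_lt (e : Int) (h : 255 < e) : (e >>> (8 : Nat)).toNat < e.toNat := by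
  simp only [Int.shiftRight_eq_div_pow]
  omega

-- A's 'while True' loop: appends e & 255 while e > 255, then appends e and reverses.
def pvALoop (e : Int) (acc : List Int) : List Int :=
  if h : 255 < e then pvALoop (e >>> (8 : Nat)) (acc ++ [PySem.Int.band e 255])
  else (acc ++ [e]).reverse
termination_by e.toNat
decreasing_by exact pv_shift8_lt e h

def calculate_extended_args (arg : Int) : List Int × Int :=
  if 255 < arg then (pvALoop (arg >>> (8 : Nat)) [], PySem.Int.band arg 255)
  else ([], arg)

-- ===== PORT B =====
def calculate_extended_args_alt (arg : Int) : List Int × Int :=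
  if arg <= 255 then ([], arg)
  else
    let n := (PySem.Int.bitLength arg + 7) / 8
    -- arg.to_bytes(n, 'big') : byte i is (arg >> (8*(n-1-i))) & 255 -- exact here since 0 <= arg < 256^n
    let data := (List.range n).map (fun i => PySem.Int.band (arg >>> (8 * (n - 1 - i))) 255)
    -- data[:-1] and data[-1]; n >= 1 here, so dropLast/getLastD are exact
    (data.dropLast, data.getLastD 0)

-- ===== PRECONDITION & SPEC =====
def Spec_calculate_extended_args (arg : Int) (out : List Int × Int) : Prop := out = calculate_extended_args_alt arg
instance (arg : Int) (out : List Int × Int) : Decidable (Spec_calculate_extended_args arg out) := by unfold Spec_calculate_extended_args; infer_instance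

-- ===== CLAIM (what is proved, stated in full; the proofs are below) =====
def Claim_equal_calculate_extended_args : Prop := ∀ (arg : Int), Dom_calculate_extended_args arg → Spec_calculate_extended_args arg (calculate_extended_args arg)

-- ===== LEMMAS AND PROOFS =====

-- canonical big-endian base-256 digits of a Nat
theorem pv_div256_lt (m : Nat) (h : ¬ m < 256) : m / 256 < m :=
  Nat.div_lt_self (by omega) (by omega)

def pvBE (m : Nat) : List Nat :=
  if h : m < 256 then [m] else pvBE (m / 256) ++ [m % 256]
termination_by m
decreasing_by exact pv_div256_lt m h

theorem pvBE_large {m : Nat} (h : 256 ≤ m) : pvBE m = pvBE (m / 256) ++ [m % 256] := by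
  rw [pvBE]; simp [Nat.not_lt.mpr h]

theorem pv_shift_natCast (m k : Nat) : ((m : Int) >>> k) = ((m >>> k : Nat) : Int) := by
  simp

theorem pv_and255 (m : Nat) : m &&& 255 = m % 256 := Nat.and_two_pow_sub_one_eq_mod m 8

theorem pv_band255_natCast (m : Nat) : PySem.Int.band (m : Int) 255 = ((m % 256 : Nat) : Int) := by
  rw [show (255 : Int) = ((255 : Nat) : Int) from rfl, PySem.Int.band_natCast]
  rw [Nat.and_two_pow_sub_one_eq_mod m 8]

theorem pvALoop_eq (m : Nat) (acc : List Int) :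
    pvALoop (m : Int) acc = (acc ++ ((pvBE m).map (fun x : Nat => (x : Int))).reverse).reverse := by
  induction m using Nat.strong_induction_on generalizing acc with
  | _ m ih =>
    rw [pvALoop]
    by_cases h : 255 < m
    · rw [dif_pos (by exact_mod_cast h)]
      rw [pv_shift_natCast, pv_band255_natCast]
      rw [Nat.shiftRight_eq_div_pow, show (2:Nat)^8 = 256 from rfl]
      rw [ih (m / 256) (Nat.div_lt_self (by omega) (by omega))]
      rw [show pvBE m = pvBE (m / 256) ++ [m % 256] from pvBE_large (by omega)]
      simp [List.reverse_append]
    · rw [dif_neg (by exact_mod_cast h)]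
      rw [pvBE]
      simp [show m < 256 by omega]

theorem pv_bl_pow : ∀ (k m : Nat), 2 ^ k ≤ m →
    PySem.Int.bitLength (m : Int) = PySem.Int.bitLength ((m / 2 ^ k : Nat) : Int) + k := by
  intro k
  induction k with
  | zero => intro m _; simp
  | succ k ih =>
    intro m hm
    have h2 : 2 ^ (k + 1) = 2 * 2 ^ k := by ring
    have hpos : 0 < m := lt_of_lt_of_le (Nat.pow_pos (by omega)) hm
    rw [PySem.Int.bitLength_natCast hpos]
    rw [ih (m / 2) (by omega)]
    rw [Nat.div_div_eq_div_mul]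
    rw [show 2 * 2 ^ k = 2 ^ (k + 1) from h2.symm]
    omega

theorem pv_bl_le8 {m : Nat} (h0 : 1 ≤ m) (h : m < 256) : PySem.Int.bitLength (m : Int) ≤ 8 := by
  by_contra hc
  have hne : (m : Int) ≠ 0 := by exact_mod_cast (by omega : m ≠ 0)
  have hlb := PySem.Int.two_pow_bitLength_le (m : Int) hne
  have hn : (m : Int).natAbs = m := by simp
  rw [hn] at hlb
  have h256 : (256 : Nat) ≤ m :=
    le_trans (le_trans (by norm_num) (Nat.pow_le_pow_right (by omega) (by omega : 8 ≤ PySem.Int.bitLength (m : Int) - 1))) hlb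
  omega

theorem pv_bl_pos {m : Nat} (h0 : 1 ≤ m) : 1 ≤ PySem.Int.bitLength (m : Int) := by
  by_contra hc
  have hlt := PySem.Int.lt_two_pow_bitLength (m : Int)
  have hn : (m : Int).natAbs = m := by simp
  rw [hn] at hlt
  have h0' : PySem.Int.bitLength (m : Int) = 0 := by omega
  rw [h0'] at hlt
  simp at hlt
  omega

-- nb m = number of bytes B uses
theorem pv_bytes_eq : ∀ (m : Nat), 1 ≤ m →
    (List.range ((PySem.Int.bitLength (m : Int) + 7) / 8)).map
      (fun i => (m >>> (8 * ((PySem.Int.bitLength (m : Int) + 7) / 8 - 1 - i))) &&& 255) = pvBE m := by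
  intro m
  induction m using Nat.strong_induction_on with
  | _ m ih =>
    intro h1
    by_cases h : m < 256
    · have hle := pv_bl_le8 h1 h
      have hpos := pv_bl_pos h1
      have hn1 : (PySem.Int.bitLength (m : Int) + 7) / 8 = 1 := by omega
      rw [hn1]
      rw [pvBE]; rw [dif_pos h]
      simp [pv_and255, Nat.mod_eq_of_lt h]
    · rw [Nat.not_lt] at h
      have hbl : PySem.Int.bitLength (m : Int) = PySem.Int.bitLength ((m / 256 : Nat) : Int) + 8 := by
        have := pv_bl_pow 8 m (by norm_num; omega)
        norm_num at this
        exact this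
      set n' := (PySem.Int.bitLength ((m / 256 : Nat) : Int) + 7) / 8 with hn'
      have hnb : (PySem.Int.bitLength (m : Int) + 7) / 8 = n' + 1 := by rw [hbl]; omega
      rw [hnb]
      rw [List.range_succ, List.map_append]
      have hlast : (m >>> (8 * (n' + 1 - 1 - n'))) &&& 255 = m % 256 := by
        rw [show n' + 1 - 1 - n' = 0 by omega]
        simp [pv_and255]
      rw [List.map_singleton, hlast]
      have hmain : (List.range n').map (fun i => (m >>> (8 * (n' + 1 - 1 - i))) &&& 255)
          = (List.range n').map (fun i => ((m / 256) >>> (8 * (n' - 1 - i))) &&& 255) := by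
        apply List.map_congr_left
        intro i hi
        rw [List.mem_range] at hi
        have he : 8 * (n' + 1 - 1 - i) = 8 + 8 * (n' - 1 - i) := by omega
        rw [he, Nat.shiftRight_add]
        congr 2
        rw [Nat.shiftRight_eq_div_pow]
      rw [hmain, ih (m / 256) (Nat.div_lt_self (by omega) (by omega)) (by omega)]
      rw [pvBE_large h]

-- ===== VERDICT (by name: the statement is the Claim_ definition above) =====
theorem calculate_extended_args_spec : Claim_equal_calculate_extended_args := by
  intro arg _
  unfold Spec_calculate_extended_args calculate_extended_args calculate_extended_args_alt
  by_cases h : 255 < arg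
  · rw [if_pos h, if_neg (by omega)]
    obtain ⟨m, rfl⟩ : ∃ m : Nat, arg = (m : Int) :=
      ⟨arg.toNat, (Int.toNat_of_nonneg (by omega)).symm⟩
    have hm : 255 < m := by exact_mod_cast h
    rw [pv_shift_natCast, pv_band255_natCast]
    rw [Nat.shiftRight_eq_div_pow, show (2:Nat)^8 = 256 from rfl]
    rw [pvALoop_eq]
    simp only [List.nil_append, List.reverse_reverse]
    have hdata : (List.range ((PySem.Int.bitLength ((m : Nat) : Int) + 7) / 8)).map
        (fun i => PySem.Int.band ((m : Int) >>> (8 * ((PySem.Int.bitLength ((m : Nat) : Int) + 7) / 8 - 1 - i))) 255)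
        = (pvBE m).map (fun x : Nat => (x : Int)) := by
      rw [← pv_bytes_eq m (by omega), List.map_map]
      apply List.map_congr_left
      intro i _
      rw [pv_shift_natCast]
      simp only [Function.comp]
      rw [pv_band255_natCast]
      congr 1
      exact (pv_and255 _).symm
    rw [hdata]
    rw [show pvBE m = pvBE (m / 256) ++ [m % 256] from pvBE_large (by omega)]
    rw [List.map_append, List.map_singleton]
    rw [List.dropLast_concat, List.getLastD_concat]
  · rw [if_neg h, if_pos (by omega)]
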